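-- pv_equiv track=rewrite | github.com/wllclngn/School | Graduate-School/CIS657/FINAL/XINU SIM/utils/windows_compat.py | adjust_compiler_flags
-- ===== SOURCE A (Python) =====
-- INCOMPATIBLE_FLAGS = {
--     "-m": "elf_i386",  # Linker flag not supported on Windows
--     "-march=i586": "-march=i586",  # Keep this flag, it works on MinGW
--     "-fno-builtin": "-fno-builtin",  # Keep this one
--     "-fno-stack-protector": "-fno-stack-protector",  # Keep this one
--     "-nostdlib": "-nostdlib",  # Keep this one
-- }
--
-- def adjust_compiler_flags(flags):
--     # Modify compiler flags to be compatible with Windows/MinGW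
--     if not isinstance(flags, list):
--         flags = flags.split()
--
--     adjusted_flags = []
--     skip_next = False
--
--     for i, flag in enumerate(flags):
--         if skip_next:
--             skip_next = False
--             continue
--
--         # Check for flags that need special handling
--         if flag == "-m" and i+1 < len(flags) and flags[i+1] == "elf_i386":
--             # Skip both the -m and elf_i386
--             skip_next = True
--         elif flag in INCOMPATIBLE_FLAGS:
--             replacement = INCOMPATIBLE_FLAGS[flag]
--             if replacement:
--                 adjusted_flags.append(replacement)
--         else:
--             # Keep other flags
--             adjusted_flags.append(flag)
--
--     # Add Windows-specific flags as needed
--     if "-m32" in flags and "-m64" not in adjusted_flags: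
--         adjusted_flags.append("-m32")  # Ensure 32-bit compilation
--
--     return adjusted_flags
-- ===== SOURCE B (Python) =====
-- INCOMPATIBLE_FLAGS = {
--     "-m": "elf_i386",
--     "-march=i586": "-march=i586",
--     "-fno-builtin": "-fno-builtin",
--     "-fno-stack-protector": "-fno-stack-protector",
--     "-nostdlib": "-nostdlib",
-- }
--
-- def _collapse_m_elf(flags):
--     # Pass 1: drop each consecutive '-m', 'elf_i386' pair (consume 2 or 1 at a time).
--     out = []
--     i = 0
--     while i < len(flags):
--         if i + 1 < len(flags) and flags[i] == "-m" and flags[i + 1] == "elf_i386":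
--             i += 2
--         else:
--             out.append(flags[i])
--             i += 1
--     return out
--
-- def _map_flag(flag):
--     # Pass 2: replace via the table (truthy replacement only), else keep.
--     if flag in INCOMPATIBLE_FLAGS:
--         repl = INCOMPATIBLE_FLAGS[flag]
--         return [repl] if repl else []
--     return [flag]
--
-- def adjust_compiler_flags(flags):
--     if not isinstance(flags, list):
--         flags = flags.split()
--     core = [g for f in _collapse_m_elf(flags) for g in _map_flag(f)]
--     if "-m32" in flags and "-m64" not in core:
--         core.append("-m32")
--     return core
-- ===== Notes on version B (the rewrite author's own statement) =====
-- stated objective: alternative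
-- what changed: A's single indexed loop with a skip_next flag is replaced by two passes: first collapse consecutive '-m elf_i386' pairs, then map each surviving flag through the replacement table, then the '-m32' tail check.
import Mathlib
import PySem

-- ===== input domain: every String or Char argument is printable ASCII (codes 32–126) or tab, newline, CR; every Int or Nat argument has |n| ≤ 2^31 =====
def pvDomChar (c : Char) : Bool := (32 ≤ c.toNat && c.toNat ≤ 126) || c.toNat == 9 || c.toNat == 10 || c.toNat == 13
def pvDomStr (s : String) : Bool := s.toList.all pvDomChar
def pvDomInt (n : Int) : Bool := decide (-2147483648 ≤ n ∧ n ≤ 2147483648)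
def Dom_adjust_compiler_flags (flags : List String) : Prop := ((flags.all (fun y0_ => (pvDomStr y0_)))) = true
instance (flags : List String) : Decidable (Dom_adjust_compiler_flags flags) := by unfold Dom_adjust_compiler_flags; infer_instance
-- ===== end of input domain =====

-- B replaces A's single skip_next-flag loop by a collapse pass then a map pass (alternative decomposition,
-- same cost). Equivalence is over the List-String argument (Python's non-list split branch is outside the type).

-- ===== PORT A =====
def INCOMPATIBLE_FLAGS : PySem.Dict String String :=
  PySem.Dict.ofList [("-m", "elf_i386"), ("-march=i586", "-march=i586"),
    ("-fno-builtin", "-fno-builtin"), ("-fno-stack-protector", "-fno-stack-protector"),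
    ("-nostdlib", "-nostdlib")]

-- the 'for i, flag in enumerate(flags)' loop with its skip_next flag, as index recursion
def adjust_loopA (flags : List String) (i : Nat) (adjusted : List String) (skip_next : Bool) :
    List String :=
  if h : i < flags.length then
    let flag := flags[i]
    if skip_next then
      adjust_loopA flags (i+1) adjusted false
    else if flag = "-m" ∧ i+1 < flags.length ∧
        PySem.List.pyGet? flags ((i:Int)+1) = some "elf_i386" then
      adjust_loopA flags (i+1) adjusted true
    else match INCOMPATIBLE_FLAGS.get? flag with
      | some replacement =>
        if replacement ≠ "" then adjust_loopA flags (i+1) (adjusted ++ [replacement]) false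
        else adjust_loopA flags (i+1) adjusted false
      | none => adjust_loopA flags (i+1) (adjusted ++ [flag]) false
  else adjusted
termination_by flags.length - i

def adjust_compiler_flags (flags : List String) : List String :=
  let adjusted_flags := adjust_loopA flags 0 [] false
  if flags.contains "-m32" && !(adjusted_flags.contains "-m64") then
    adjusted_flags ++ ["-m32"]
  else adjusted_flags

-- ===== PORT B =====
-- Source B's pass-1 while loop over the remaining list (len>=2 ∧ head pair test)
def collapse_m_elf : List String → List String
  | f :: g :: rest =>
    if f = "-m" ∧ g = "elf_i386" then collapse_m_elf rest
    else f :: collapse_m_elf (g :: rest)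
  | [f] => [f]
  | [] => []

def map_flag (flag : String) : List String :=
  match INCOMPATIBLE_FLAGS.get? flag with
  | some repl => if repl ≠ "" then [repl] else []
  | none => [flag]

def adjust_compiler_flags_alt (flags : List String) : List String :=
  let core := (collapse_m_elf flags).flatMap map_flag
  if flags.contains "-m32" && !(core.contains "-m64") then core ++ ["-m32"]
  else core

-- ===== PRECONDITION & SPEC =====
def Spec_adjust_compiler_flags (flags : List String) (out : List String) : Prop := out = adjust_compiler_flags_alt flags
instance (flags : List String) (out : List String) : Decidable (Spec_adjust_compiler_flags flags out) := by unfold Spec_adjust_compiler_flags; infer_instance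

-- ===== CLAIM (what is proved, stated in full; the proofs are below) =====
def Claim_equal_adjust_compiler_flags : Prop := ∀ (flags : List String), Dom_adjust_compiler_flags flags → Spec_adjust_compiler_flags flags (adjust_compiler_flags flags)

-- ===== LEMMAS AND PROOFS =====

-- A's loop from index i computes the collapse-then-map of the suffix, appended to the accumulator.
theorem adjust_loopA_eq (flags : List String) :
    ∀ i acc, adjust_loopA flags i acc false
      = acc ++ (collapse_m_elf (flags.drop i)).flatMap map_flag := by
  intro i
  induction hn : flags.length - i using Nat.strong_induction_on generalizing i with
  | _ n ih =>
    intro acc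
    rw [adjust_loopA]
    by_cases h : i < flags.length
    · simp only [h, dif_pos]
      have hdrop : flags.drop i = flags[i] :: flags.drop (i+1) :=
        List.drop_eq_getElem_cons h
      by_cases hm : flags[i] = "-m" ∧ i+1 < flags.length ∧
          PySem.List.pyGet? flags ((i:Int)+1) = some "elf_i386"
      · obtain ⟨h1, h2, h3⟩ := hm
        rw [if_neg (by simp : ¬(false = true)),
          if_pos (show flags[i] = "-m" ∧ i+1 < flags.length ∧
            PySem.List.pyGet? flags ((i:Int)+1) = some "elf_i386" from ⟨h1, h2, h3⟩)]
        -- skip state: one more step consuming flags[i+1]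
        rw [adjust_loopA]
        simp only [h2, dif_pos, if_pos]
        have hget : flags[i+1]'h2 = "elf_i386" := by
          have hc : PySem.List.pyGet? flags ((i:Int)+1) = some (flags[i+1]'h2) := by
            rw [show ((i:Int)+1) = ((i+1 : Nat) : Int) by push_cast; ring,
              PySem.List.pyGet?_natCast, List.getElem?_eq_getElem h2]
          rw [hc] at h3; exact Option.some.inj h3
        have hdrop2 : flags.drop (i+1) = "elf_i386" :: flags.drop (i+2) := by
          rw [List.drop_eq_getElem_cons h2, hget]
        rw [ih (flags.length - (i+2)) (by omega) (i+2) rfl acc, hdrop, hdrop2, h1]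
        rw [collapse_m_elf]
        simp
      · rw [if_neg (by simp : ¬(false = true)), if_neg hm]
        have hcol : collapse_m_elf (flags.drop i)
            = flags[i] :: collapse_m_elf (flags.drop (i+1)) := by
          rw [hdrop]
          cases hd : flags.drop (i+1) with
          | nil => simp [collapse_m_elf]
          | cons y ys =>
            rw [collapse_m_elf, if_neg, ← hd]
            rintro ⟨e1, e2⟩
            have hl : i + 1 < flags.length := by
              have := List.length_drop (l := flags) (i := i+1)
              rw [hd] at this; simp at this; omega
            apply hm
            refine ⟨e1, hl, ?_⟩
            have hy : flags[i+1]'hl = y := by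
              have := List.drop_eq_getElem_cons hl
              rw [hd] at this
              exact (List.cons.inj this.symm).1
            rw [show ((i:Int)+1) = ((i+1 : Nat) : Int) by push_cast; ring,
              PySem.List.pyGet?_natCast, List.getElem?_eq_getElem hl, hy, e2]
        rw [hcol]
        cases hg : INCOMPATIBLE_FLAGS.get? flags[i] with
        | some repl =>
          by_cases hr : repl ≠ ""
          · simp only [if_pos hr]
            rw [ih (flags.length - (i+1)) (by omega) (i+1) rfl]
            simp [map_flag, hg, hr]
          · simp only [if_neg hr]
            rw [ih (flags.length - (i+1)) (by omega) (i+1) rfl]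
            simp only [ne_eq, Decidable.not_not] at hr
            simp [map_flag, hg, hr]
        | none =>
          have hrec := ih (flags.length - (i+1)) (by omega) (i+1) rfl (acc ++ [flags[i]])
          rw [hrec]
          simp [map_flag, hg]
    · simp only [h, dif_neg, not_false_iff]
      rw [List.drop_eq_nil_of_le (by omega)]
      rw [collapse_m_elf]
      simp

-- ===== VERDICT (by name: the statement is the Claim_ definition above) =====
theorem adjust_compiler_flags_spec : Claim_equal_adjust_compiler_flags := by
  intro flags _
  unfold Spec_adjust_compiler_flags adjust_compiler_flags adjust_compiler_flags_alt
  rw [adjust_loopA_eq flags 0 []]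
  simp
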